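-- pv_equiv track=rewrite | github.com/hy-cs-16/aligothms | book/이것이-코딩-테스트다-with-python/ch3-greedy/큰-수의-법칙.py | solution_in_book
-- ===== SOURCE A (Python) =====
-- def solution_in_book(M: int, K: int, nums: list[int]):
--     nums.sort()
--     first = nums[len(nums) - 1]
--     second = nums[len(nums) - 2]
--
--     result = 0
--
--     while True:
--         for i in range(K):
--             if M == 0:
--                 break
--             result += first
--             M -= 1
--
--         if M == 0:
--             break
--         result += second
--         M -= 1
--
--     return result
-- ===== SOURCE B (Python) =====
-- def solution_in_book(M: int, K: int, nums: list[int]):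
--     # closed form: in every block of K+1 picks, the second-largest is used once.
--     # (Return-value equivalence only: A sorts nums in place, B leaves it unchanged.)
--     s = sorted(nums)
--     first, second = s[-1], s[-2]
--     seconds = M // (K + 1)
--     return first * (M - seconds) + second * seconds
-- ===== Notes on version B (the rewrite author's own statement) =====
-- stated objective: alternative
-- what changed: Replaces A's pick-by-pick simulation loop (one iteration per pick, M total) by the closed-form counts: the second-largest is used floor(M/(K+1)) times and the largest the remaining times.
-- outside the precondition, e.g. on solution_in_book(2, -1, [1, 5]): A returns 2, B raises ZeroDivisionError; on solution_in_book(3, 2, [7]): A returns 21, B raises IndexError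
import Mathlib
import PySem

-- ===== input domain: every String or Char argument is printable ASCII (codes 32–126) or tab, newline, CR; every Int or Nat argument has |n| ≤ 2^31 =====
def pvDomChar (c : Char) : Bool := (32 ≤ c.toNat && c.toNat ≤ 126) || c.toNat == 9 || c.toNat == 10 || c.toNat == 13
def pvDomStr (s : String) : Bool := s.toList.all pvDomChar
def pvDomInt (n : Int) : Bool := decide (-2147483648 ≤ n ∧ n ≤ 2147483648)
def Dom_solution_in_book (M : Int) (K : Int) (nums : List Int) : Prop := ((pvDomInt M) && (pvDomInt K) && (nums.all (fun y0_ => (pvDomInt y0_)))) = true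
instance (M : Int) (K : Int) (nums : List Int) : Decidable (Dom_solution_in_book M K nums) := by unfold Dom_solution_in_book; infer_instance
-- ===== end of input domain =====

-- B replaces A's pick-by-pick simulation loop by the closed-form use counts;
-- return-value equivalence only: A sorts nums in place, B does not mutate it.


-- ===== PORT A =====
-- inner 'for i in range(K)' loop: state (M, result), 'break' when M == 0
def sibFor (first : Int) : List Int → Int → Int → Int × Int
  | [], m, r => (m, r)
  | _ :: is, m, r => if m = 0 then (m, r) else sibFor first is (m - 1) (r + first)

-- outer 'while True' loop; fuel makes the port total (under Pre_ the fuel never runs out)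
def sibWhile (first second K : Int) : Nat → Int → Int → Int
  | 0, _, r => r
  | fuel + 1, m, r =>
      let p := sibFor first (PySem.List.pyRange 0 K 1) m r
      if p.1 = 0 then p.2 else sibWhile first second K fuel (p.1 - 1) (p.2 + second)

def solution_in_book (M : Int) (K : Int) (nums : List Int) : Int :=
  let s := PySem.List.sorted nums (fun x => x) false
  let first := PySem.List.pyGetD s ((s.length : Int) - 1) 0
  let second := PySem.List.pyGetD s ((s.length : Int) - 2) 0
  sibWhile first second K (M.toNat + 1) M 0

-- ===== PORT B =====
def solution_in_book_alt (M : Int) (K : Int) (nums : List Int) : Int :=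
  let s := PySem.List.sorted nums (fun x => x) false
  let first := PySem.List.pyGetD s (-1) 0
  let second := PySem.List.pyGetD s (-2) 0
  let seconds := PySem.Int.floordiv M (K + 1)
  first * (M - seconds) + second * seconds

-- ===== PRECONDITION & SPEC =====
-- Pre_ excludes: nums = [] (A raises IndexError) and M < 0 (A loops forever); it also excludes
-- K < 0 (A returns second*M, B's natural '// (K+1)' raises ZeroDivisionError) and one-element
-- lists (A's nums[len-2] wraps to nums[-1] so second = first; B's natural s[-2] raises IndexError).
def Pre_solution_in_book (M : Int) (K : Int) (nums : List Int) : Prop :=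
  0 ≤ M ∧ 0 ≤ K ∧ 2 ≤ nums.length
instance (M : Int) (K : Int) (nums : List Int) : Decidable (Pre_solution_in_book M K nums) := by unfold Pre_solution_in_book; infer_instance

def pvWitness_solution_in_book : Int × Int × List Int := (5, 2, [2, 4, 6])

def Spec_solution_in_book (M : Int) (K : Int) (nums : List Int) (out : Int) : Prop := out = solution_in_book_alt M K nums
instance (M : Int) (K : Int) (nums : List Int) (out : Int) : Decidable (Spec_solution_in_book M K nums out) := by unfold Spec_solution_in_book; infer_instance

-- ===== CLAIM (what is proved, stated in full; the proofs are below) =====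
def Claim_equal_solution_in_book : Prop := ∀ (M : Int) (K : Int) (nums : List Int), Dom_solution_in_book M K nums → Pre_solution_in_book M K nums → Spec_solution_in_book M K nums (solution_in_book M K nums)

-- ===== LEMMAS AND PROOFS =====

-- the inner for-loop uses min(len, M) firsts
theorem sibFor_spec (f : Int) (l : List Int) (m r : Int) (hm : 0 ≤ m) :
    sibFor f l m r = (m - min (l.length : Int) m, r + f * min (l.length : Int) m) := by
  induction l generalizing m r with
  | nil => simp [sibFor]; omega
  | cons x xs ih =>
      by_cases h0 : m = 0
      · subst h0; simp [sibFor]; omega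
      · have h1 : 1 ≤ m := by omega
        rw [sibFor, if_neg h0, ih (m - 1) (r + f) (by omega)]
        have hmin : min ((x :: xs).length : Int) m = min (xs.length : Int) (m - 1) + 1 := by
          simp only [List.length_cons]; push_cast; omega
        rw [Prod.mk.injEq, hmin]
        exact ⟨by ring, by ring⟩

theorem sibWhile_spec (f s K : Int) (hK : 0 ≤ K) :
    ∀ (fuel : Nat) (m r : Int), 0 ≤ m → m < (fuel : Int) →
    sibWhile f s K fuel m r =
      r + f * (m - m / (K + 1)) + s * (m / (K + 1)) := by
  intro fuel
  induction fuel with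
  | zero => intro m r hm hf; exfalso; omega
  | succ n ih =>
      intro m r hm hf
      have hlen : ((PySem.List.pyRange 0 K 1).length : Int) = K := by
        rw [PySem.List.length_pyRange_one]; omega
      rw [sibWhile, sibFor_spec f _ m r hm]
      simp only [hlen]
      by_cases hstop : m - min K m = 0
      · rw [if_pos hstop]
        have hMK : m ≤ K := by omega
        have hdiv : m / (K + 1) = 0 := Int.ediv_eq_zero_of_lt hm (by omega)
        rw [hdiv, min_eq_right hMK]; ring
      · rw [if_neg hstop]
        have hKm : K < m := by omega
        have hminK : min K m = K := by omega
        rw [hminK, ih (m - K - 1) (r + f * K + s) (by omega) (by omega)]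
        have hdiv : m / (K + 1) = (m - K - 1) / (K + 1) + 1 := by
          have h2 := Int.add_mul_ediv_right (m - K - 1) 1 (show (K : Int) + 1 ≠ 0 by omega)
          have h3 : m - K - 1 + 1 * (K + 1) = m := by ring
          rw [h3] at h2; omega
        rw [hdiv]; ring

-- A's loop equals B's closed form, for any list standing for the sorted nums
theorem sib_key (M K : Int) (s : List Int) (hM : 0 ≤ M) (hK : 0 ≤ K) (h2 : 2 ≤ s.length) :
    sibWhile (PySem.List.pyGetD s ((s.length : Int) - 1) 0)
             (PySem.List.pyGetD s ((s.length : Int) - 2) 0) K (M.toNat + 1) M 0 =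
    PySem.List.pyGetD s (-1) 0 * (M - PySem.Int.floordiv M (K + 1)) +
      PySem.List.pyGetD s (-2) 0 * PySem.Int.floordiv M (K + 1) := by
  have hfirst : PySem.List.pyGetD s ((s.length : Int) - 1) 0 = PySem.List.pyGetD s (-1) 0 := by
    rw [PySem.List.pyGetD_eq_getElem s 0 (by omega) (by omega),
        PySem.List.pyGetD_neg_ofNat s 1 0 (by omega) (by omega)]
    congr 1; omega
  have hsecond : PySem.List.pyGetD s ((s.length : Int) - 2) 0 = PySem.List.pyGetD s (-2) 0 := by
    rw [PySem.List.pyGetD_eq_getElem s 0 (by omega) (by omega),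
        PySem.List.pyGetD_neg_ofNat s 2 0 (by omega) (by omega)]
    congr 1; omega
  rw [hfirst, hsecond,
      sibWhile_spec _ _ K hK (M.toNat + 1) M 0 hM (by omega),
      PySem.Int.floordiv_eq_ediv_of_pos (show (0:Int) < K + 1 by omega)]
  ring

-- ===== VERDICT (by name: the statement is the Claim_ definition above) =====
theorem solution_in_book_spec : Claim_equal_solution_in_book := by
  intro M K nums _hdom hpre
  obtain ⟨hM, hK, hlen⟩ := hpre
  have hslen : 2 ≤ (PySem.List.sorted nums (fun x => x) false).length := by
    rw [PySem.List.length_sorted]; exact hlen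
  exact sib_key M K (PySem.List.sorted nums (fun x => x) false) hM hK hslen
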